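-- pv_equiv track=rewrite | github.com/NPGrant81/fantasy-football-pi | backend/scripts/load_mfl_html_normalized.py | _single_int_from_rows
-- ===== SOURCE A (Python) =====
-- import math
-- from typing import Any
--
-- def _safe_int(value: Any) -> int | None:
--     if value is None:
--         return None
--     if isinstance(value, float) and math.isnan(value):
--         return None
--     text = str(value).strip()
--     if not text:
--         return None
--     try:
--         return int(float(text))
--     except Exception:  # noqa: BLE001
--         return None
--
-- def _single_int_from_rows(rows: list[dict[str, Any]], key: str) -> int | None:
--     values = {
--         value
--         for row in rows
--         if (value := _safe_int(row.get(key))) is not None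
--     }
--     if len(values) == 1:
--         return values.pop()
--     return None
-- ===== SOURCE B (Python) =====
-- import math
-- from typing import Any
--
--
-- def _safe_int(value: Any) -> int | None:
--     if value is None:
--         return None
--     if isinstance(value, float) and math.isnan(value):
--         return None
--     text = str(value).strip()
--     if not text:
--         return None
--     try:
--         return int(float(text))
--     except Exception:  # noqa: BLE001
--         return None
--
--
-- def _single_int_from_rows(rows: list[dict[str, Any]], key: str) -> int | None:
--     found = None
--     for row in rows:
--         v = _safe_int(row.get(key))
--         if v is None:
--             continue
--         if found is None:
--             found = v
--         elif v != found:
--             return None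
--     return found
-- ===== Notes on version B (the rewrite author's own statement) =====
-- stated objective: alternative
-- what changed: Replaces the set comprehension plus len==1/pop with a single-pass scan that tracks one 'found' scalar and returns None immediately on the first divergent value (early exit), never materializing a set.
import Mathlib
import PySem

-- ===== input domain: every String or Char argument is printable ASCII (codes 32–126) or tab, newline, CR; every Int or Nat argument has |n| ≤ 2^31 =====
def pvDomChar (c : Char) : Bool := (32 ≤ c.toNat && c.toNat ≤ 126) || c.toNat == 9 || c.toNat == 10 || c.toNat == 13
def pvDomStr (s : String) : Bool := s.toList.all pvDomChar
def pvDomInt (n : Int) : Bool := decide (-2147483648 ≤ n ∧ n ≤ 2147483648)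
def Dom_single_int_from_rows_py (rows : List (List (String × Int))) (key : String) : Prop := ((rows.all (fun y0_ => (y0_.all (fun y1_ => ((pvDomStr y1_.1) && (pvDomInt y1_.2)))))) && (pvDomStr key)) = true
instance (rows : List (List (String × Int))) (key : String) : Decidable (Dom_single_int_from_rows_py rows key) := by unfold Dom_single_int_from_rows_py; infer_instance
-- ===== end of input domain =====

-- B changes the decomposition: one tracked scalar with an early exit instead of building a set and sizing it.
-- ===== PORT A =====
-- _safe_int(value) for value : Option Int: the NaN branch never fires (value is an int),
-- and int(float(str(n))) = n exactly for |n| ≤ 2^31 (Dom bound, well below 2^53) — exact there.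
def safeInt_py (value : Option Int) : Option Int :=
  match value with
  | none => none
  | some n =>
    let text := PySem.Str.strip (PySem.Int.toStr n)
    if text = "" then none else some n

def single_int_from_rows_py (rows : List (List (String × Int))) (key : String) : Option Int :=
  -- set comprehension: build the set of non-None _safe_int(row.get(key))
  let values : PySem.Set Int := rows.foldl (fun s row =>
    match safeInt_py ((PySem.Dict.mk row).get? key) with
    | some v => PySem.Set.add s v
    | none => s) PySem.Set.empty
  -- if len(values) == 1: return values.pop()  (pop of a 1-element set is its element)
  if PySem.Set.len values = 1 then values.head? else none

-- ===== PORT B =====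
def singleGo (key : String) (found : Option Int) : List (List (String × Int)) → Option Int
  | [] => found
  | row :: rest =>
    match safeInt_py ((PySem.Dict.mk row).get? key) with
    | none => singleGo key found rest
    | some v =>
      match found with
      | none => singleGo key (some v) rest
      | some f => if v = f then singleGo key found rest else none

def single_int_from_rows_py_alt (rows : List (List (String × Int))) (key : String) : Option Int :=
  singleGo key none rows

-- ===== PRECONDITION & SPEC =====
def Spec_single_int_from_rows_py (rows : List (List (String × Int))) (key : String) (out : Option Int) : Prop := out = single_int_from_rows_py_alt rows key
instance (rows : List (List (String × Int))) (key : String) (out : Option Int) : Decidable (Spec_single_int_from_rows_py rows key out) := by unfold Spec_single_int_from_rows_py; infer_instance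

-- ===== CLAIM (what is proved, stated in full; the proofs are below) =====
def Claim_equal_single_int_from_rows_py : Prop := ∀ (rows : List (List (String × Int))) (key : String), Dom_single_int_from_rows_py rows key → Spec_single_int_from_rows_py rows key (single_int_from_rows_py rows key)

-- ===== LEMMAS AND PROOFS =====

-- the fold A performs, abstracted over the starting set
def buildSet (key : String) (s : PySem.Set Int) (rows : List (List (String × Int))) : PySem.Set Int :=
  rows.foldl (fun s row =>
    match safeInt_py ((PySem.Dict.mk row).get? key) with
    | some v => PySem.Set.add s v
    | none => s) s

-- the final len-1 check of A, as a match on the element list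
def finishSet (s : PySem.Set Int) : Option Int :=
  match s with
  | [v] => some v
  | _ => none

lemma mem_buildSet {key : String} {s : PySem.Set Int} {x : Int} (rows : List (List (String × Int)))
    (hx : x ∈ s) : x ∈ buildSet key s rows := by
  induction rows generalizing s with
  | nil => exact hx
  | cons r rest ih =>
    simp only [buildSet, List.foldl] at *
    cases h : safeInt_py ((PySem.Dict.mk r).get? key) with
    | none => exact ih hx
    | some v =>
      apply ih
      simp only [PySem.Set.add]
      split
      · exact hx
      · exact List.mem_append_left _ hx

lemma finish_two {key : String} {s : PySem.Set Int} {u v : Int}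
    (hu : u ∈ s) (hv : v ∈ s) (hne : u ≠ v) (rows : List (List (String × Int))) :
    finishSet (buildSet key s rows) = none := by
  have hu' := mem_buildSet (key := key) rows hu
  have hv' := mem_buildSet (key := key) rows hv
  unfold finishSet
  split
  · rename_i w h
    rw [h] at hu' hv'
    simp at hu' hv'
    exact absurd (hu'.trans hv'.symm) hne
  · rfl

-- the main invariant: B's loop with accumulator `found` equals A's fold started from the matching set
lemma go_eq_finish (key : String) (rows : List (List (String × Int))) :
    ∀ (found : Option Int),
      singleGo key found rows = finishSet (buildSet key (found.elim [] (fun v => [v])) rows) := by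
  induction rows with
  | nil =>
    intro found
    cases found <;> simp [singleGo, buildSet, finishSet]
  | cons r rest ih =>
    intro found
    simp only [singleGo, buildSet, List.foldl]
    cases h : safeInt_py ((PySem.Dict.mk r).get? key) with
    | none => exact ih found
    | some v =>
      cases found with
      | none =>
        have := ih (some v)
        simpa [buildSet, PySem.Set.add, PySem.Set.empty, PySem.Set.contains] using this
      | some f =>
        by_cases hvf : v = f
        · subst hvf
          have := ih (some v)
          simpa [buildSet, PySem.Set.add, PySem.Set.contains] using this
        · simp only [if_neg hvf]
          have hadd : PySem.Set.add [f] v = [f, v] := by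
            simp [PySem.Set.add, PySem.Set.contains]
            intro hc
            exact hvf hc
          exact (finish_two (key := key) (u := f) (v := v)
            (s := PySem.Set.add [f] v)
            (by rw [hadd]; simp) (by rw [hadd]; simp)
            (fun h' => hvf h'.symm) rest).symm

-- A's final len-1 check equals finishSet
lemma finish_of_len (s : PySem.Set Int) :
    (if PySem.Set.len s = 1 then s.head? else none) = finishSet s := by
  match s with
  | [] => simp [finishSet, PySem.Set.len]
  | [v] => simp [finishSet, PySem.Set.len]
  | (a :: b :: t) =>
    have : ¬ PySem.Set.len (a :: b :: t) = 1 := by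
      simp [PySem.Set.len]; omega
    simp only [if_neg this]
    rfl

lemma a_eq_finish (rows : List (List (String × Int))) (key : String) :
    single_int_from_rows_py rows key = finishSet (buildSet key PySem.Set.empty rows) := by
  unfold single_int_from_rows_py
  exact finish_of_len _

-- ===== VERDICT (by name: the statement is the Claim_ definition above) =====
theorem single_int_from_rows_py_spec : Claim_equal_single_int_from_rows_py := by
  intro rows key _
  unfold Spec_single_int_from_rows_py single_int_from_rows_py_alt
  rw [a_eq_finish, go_eq_finish]
  rfl
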